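-- pv_equiv track=rewrite | github.com/Enjef/Algo | 2300 - 2399/2389 - Longest Subsequence With Limited Sum/2389 - Longest Subsequence With Limited Sum.py | answerQueries_best_memory
-- ===== SOURCE A (Python) =====
-- from typing import List
--
-- def answerQueries_best_memory(nums: List[int], queries: List[int]) -> List[int]:
--     ans = []
--     nums.sort()
--     for ele in queries:
--         s = 0
--         count = 0
--         for i in range(len(nums)):
--             s += nums[i]
--             if s <= ele:
--                 count += 1
--         ans.append(count)
--     return ans
-- ===== SOURCE B (Python) =====
-- from typing import List
--
-- def answerQueries_best_memory(nums: List[int], queries: List[int]) -> List[int]: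
--     # Sort once, build prefix sums once, sort them, then answer each query by
--     # hand-written binary search: count of prefix sums <= q equals A's count.
--     nums.sort()
--     pre = []
--     s = 0
--     for x in nums:
--         s += x
--         pre.append(s)
--     pre.sort()
--     ans = []
--     for q in queries:
--         lo, hi = 0, len(pre)
--         while lo < hi:
--             mid = (lo + hi) // 2
--             if pre[mid] <= q:
--                 lo = mid + 1
--             else:
--                 hi = mid
--         ans.append(lo)
--     return ans
-- ===== Notes on version B (the rewrite author's own statement) =====
-- stated objective: faster
-- what changed: B computes the prefix sums of the sorted array once, sorts them, and answers each query with a hand-written binary search (count of prefix sums <= q), instead of A's full re-summation scan of nums per query.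
import Mathlib
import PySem

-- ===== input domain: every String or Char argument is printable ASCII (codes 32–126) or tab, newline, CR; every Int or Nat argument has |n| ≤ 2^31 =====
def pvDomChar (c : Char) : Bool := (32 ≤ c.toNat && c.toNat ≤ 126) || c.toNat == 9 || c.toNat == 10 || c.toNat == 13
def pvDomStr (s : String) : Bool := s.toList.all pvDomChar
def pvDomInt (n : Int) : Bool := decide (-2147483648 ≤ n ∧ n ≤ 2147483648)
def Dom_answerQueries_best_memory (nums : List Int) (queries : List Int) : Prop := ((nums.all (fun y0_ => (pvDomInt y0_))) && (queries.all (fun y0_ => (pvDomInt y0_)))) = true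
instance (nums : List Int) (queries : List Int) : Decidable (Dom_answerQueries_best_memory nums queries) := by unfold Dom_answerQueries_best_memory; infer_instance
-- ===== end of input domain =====

-- B replaces A's per-query full re-summation of sorted nums by: prefix sums built once,
-- sorted, and a binary search per query. Both Pythons sort nums in place (same mutation);
-- the equivalence proved here is about the return value.

-- ===== PORT A =====
-- A: nums.sort(); for each query, scan all indices accumulating s and counting s <= ele.
def answerQueries_best_memory (nums : List Int) (queries : List Int) : List Int :=
  let ns := PySem.List.sorted nums (fun x => x)
  queries.foldl (fun ans ele =>
    let sc := (PySem.List.pyRange 0 (PySem.List.len ns)).foldl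
      (fun (sc : Int × Int) i =>
        let s := sc.1 + PySem.List.pyGetD ns i 0   -- nums[i], always in range here
        (s, if s ≤ ele then sc.2 + 1 else sc.2)) (0, 0)
    ans ++ [sc.2]) []

-- ===== PORT B =====
-- while lo < hi: mid = (lo+hi)//2; if pre[mid] <= q: lo = mid+1 else: hi = mid
def pvBsLoop (pre : List Int) (q : Int) (lo hi : Int) : Int :=
  if h : lo < hi then
    let mid := PySem.Int.floordiv (lo + hi) 2
    if PySem.List.pyGetD pre mid 0 ≤ q then pvBsLoop pre q (mid + 1) hi
    else pvBsLoop pre q lo mid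
  else lo
termination_by (hi - lo).toNat
decreasing_by
  · simp only [PySem.Int.floordiv_eq_ediv_of_pos (by norm_num : (0:Int) < 2)]; omega
  · simp only [PySem.Int.floordiv_eq_ediv_of_pos (by norm_num : (0:Int) < 2)]; omega

def answerQueries_best_memory_alt (nums : List Int) (queries : List Int) : List Int :=
  let ns := PySem.List.sorted nums (fun x => x)
  let pre := (ns.foldl (fun (sp : Int × List Int) x => (sp.1 + x, sp.2 ++ [sp.1 + x])) (0, [])).2
  let preS := PySem.List.sorted pre (fun x => x)
  queries.foldl (fun ans q => ans ++ [pvBsLoop preS q 0 (PySem.List.len preS)]) []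

-- ===== PRECONDITION & SPEC =====
def Spec_answerQueries_best_memory (nums : List Int) (queries : List Int) (out : List Int) : Prop := out = answerQueries_best_memory_alt nums queries
instance (nums : List Int) (queries : List Int) (out : List Int) : Decidable (Spec_answerQueries_best_memory nums queries out) := by unfold Spec_answerQueries_best_memory; infer_instance

-- ===== CLAIM (what is proved, stated in full; the proofs are below) =====
def Claim_equal_answerQueries_best_memory : Prop := ∀ (nums : List Int) (queries : List Int), Dom_answerQueries_best_memory nums queries → Spec_answerQueries_best_memory nums queries (answerQueries_best_memory nums queries)

-- ===== LEMMAS AND PROOFS =====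

-- prefix sums of l starting from accumulator s
def pvPref (s : Int) : List Int → List Int
  | [] => []
  | x :: t => (s + x) :: pvPref (s + x) t

lemma pvPref_a (l : List Int) (ele : Int) : ∀ (s c : Int),
    (l.foldl (fun (sc : Int × Int) x =>
      (sc.1 + x, if sc.1 + x ≤ ele then sc.2 + 1 else sc.2)) (s, c)).2
    = c + ((pvPref s l).countP (fun p => decide (p ≤ ele)) : Int) := by
  induction l with
  | nil => simp [pvPref]
  | cons x t ih =>
    intro s c
    simp only [List.foldl_cons, pvPref, List.countP_cons, ih]
    by_cases h : s + x ≤ ele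
    · simp [h]; ring
    · simp [h]

lemma pvPref_b (l : List Int) : ∀ (s : Int) (acc : List Int),
    (l.foldl (fun (sp : Int × List Int) x => (sp.1 + x, sp.2 ++ [sp.1 + x])) (s, acc)).2
    = acc ++ pvPref s l := by
  induction l with
  | nil => simp [pvPref]
  | cons x t ih => intro s acc; simp [pvPref, ih]

-- on a sorted list, an index is below countP (· ≤ q) iff its element is ≤ q
lemma pvSorted_countP (pre : List Int) (q : Int)
    (hs : List.Pairwise (fun a b => a ≤ b) pre) :
    ∀ j (hj : j < pre.length),
      (pre[j] ≤ q ↔ j < pre.countP (fun p => decide (p ≤ q))) := by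
  induction pre with
  | nil => intro j hj; simp at hj
  | cons a t ih =>
    have ha := (List.pairwise_cons.1 hs).1
    have ht := (List.pairwise_cons.1 hs).2
    intro j hj
    cases j with
    | zero =>
      simp only [List.getElem_cons_zero, List.countP_cons]
      constructor
      · intro h; simp [h]
      · intro h
        by_contra hc
        have : t.countP (fun p => decide (p ≤ q)) = 0 := by
          rw [List.countP_eq_zero]
          intro p hp
          have := ha p hp
          simp; omega
        simp [this, hc] at h
    | succ j =>
      simp only [List.getElem_cons_succ, List.countP_cons]
      have hj' : j < t.length := by simpa using hj
      rw [ih ht j hj']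
      by_cases haq : a ≤ q
      · simp [haq]
      · have : t.countP (fun p => decide (p ≤ q)) = 0 := by
          rw [List.countP_eq_zero]
          intro p hp
          have := ha p hp
          simp; omega
        simp [haq, this]

-- the binary-search loop computes countP (· ≤ q) on a sorted list
lemma pvBsLoop_eq (pre : List Int) (q : Int)
    (hs : List.Pairwise (fun a b => a ≤ b) pre) :
    ∀ (n : Nat) (lo hi : Int), (hi - lo).toNat = n → 0 ≤ lo → hi ≤ pre.length →
    lo ≤ (pre.countP (fun p => decide (p ≤ q)) : Int) →
    (pre.countP (fun p => decide (p ≤ q)) : Int) ≤ hi →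
    pvBsLoop pre q lo hi = (pre.countP (fun p => decide (p ≤ q)) : Int) := by
  intro n
  induction n using Nat.strong_induction_on with
  | _ n ih =>
    intro lo hi hn hlo0 hhil hloc hchi
    rw [pvBsLoop]
    by_cases h : lo < hi
    · simp only [dif_pos h]
      have hm2 : PySem.Int.floordiv (lo + hi) 2 = (lo + hi) / 2 :=
        PySem.Int.floordiv_eq_ediv_of_pos (by norm_num)
      set mid := PySem.Int.floordiv (lo + hi) 2 with hmid
      have hmlo : lo ≤ mid := by omega
      have hmhi : mid < hi := by omega
      have hmr : mid.toNat < pre.length := by omega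
      have hget : PySem.List.pyGetD pre mid 0 = pre[mid.toNat] :=
        PySem.List.pyGetD_eq_getElem pre 0 (by omega) (by omega)
      have hiff := pvSorted_countP pre q hs mid.toNat hmr
      by_cases hle : PySem.List.pyGetD pre mid 0 ≤ q
      · rw [if_pos hle]
        have : mid.toNat < pre.countP (fun p => decide (p ≤ q)) := by
          rw [← hiff, ← hget]; exact hle
        exact ih (hi - (mid + 1)).toNat (by omega) (mid + 1) hi rfl (by omega) hhil (by omega) hchi
      · rw [if_neg hle]
        have : ¬ mid.toNat < pre.countP (fun p => decide (p ≤ q)) := by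
          rw [← hiff, ← hget]; exact hle
        exact ih (mid - lo).toNat (by omega) lo mid rfl hlo0 (by omega) hloc (by omega)
    · simp only [dif_neg h]
      omega

-- per-query value of A equals per-query value of B
lemma pvQuery_eq (ns : List Int) (q : Int) :
    ((PySem.List.pyRange 0 (PySem.List.len ns)).foldl
      (fun (sc : Int × Int) i =>
        (sc.1 + PySem.List.pyGetD ns i 0,
         if sc.1 + PySem.List.pyGetD ns i 0 ≤ q then sc.2 + 1 else sc.2)) (0, 0)).2
    = pvBsLoop (PySem.List.sorted (pvPref 0 ns) (fun x => x)) q 0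
        (PySem.List.len (PySem.List.sorted (pvPref 0 ns) (fun x => x))) := by
  set preS := PySem.List.sorted (pvPref 0 ns) (fun x => x) with hpreS
  have hperm : preS.Perm (pvPref 0 ns) := PySem.List.sorted_perm _ _ _
  have hcount : preS.countP (fun p => decide (p ≤ q))
      = (pvPref 0 ns).countP (fun p => decide (p ≤ q)) := hperm.countP_eq _
  have hA : ((PySem.List.pyRange 0 (PySem.List.len ns)).foldl
      (fun (sc : Int × Int) i =>
        (sc.1 + PySem.List.pyGetD ns i 0,
         if sc.1 + PySem.List.pyGetD ns i 0 ≤ q then sc.2 + 1 else sc.2)) (0, 0)).2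
      = ((ns.foldl (fun (sc : Int × Int) x =>
          (sc.1 + x, if sc.1 + x ≤ q then sc.2 + 1 else sc.2)) (0, 0))).2 := by
    rw [PySem.List.foldl_pyRange_pyGetD ns 0
      (fun (sc : Int × Int) x => (sc.1 + x, if sc.1 + x ≤ q then sc.2 + 1 else sc.2))
      (0, 0) le_rfl]
    simp
  rw [hA, pvPref_a]
  have hlen : (PySem.List.len preS) = (preS.length : Int) := rfl
  have h2 : ((preS.countP (fun p => decide (p ≤ q)) : Nat) : Int) ≤ (preS.length : Int) :=
    Nat.cast_le.2 List.countP_le_length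
  have hbs := pvBsLoop_eq preS q (PySem.List.sorted_pairwise _ _)
      (((preS.length : Int) - 0).toNat) 0 (preS.length : Int) rfl le_rfl le_rfl
      (by positivity) h2
  rw [hlen, hbs, hcount]
  ring

-- ===== VERDICT (by name: the statement is the Claim_ definition above) =====
theorem answerQueries_best_memory_spec : Claim_equal_answerQueries_best_memory := by
  intro nums queries _
  unfold Spec_answerQueries_best_memory answerQueries_best_memory answerQueries_best_memory_alt
  simp only
  rw [pvPref_b]
  simp only [List.nil_append]
  rw [PySem.List.foldl_append_singleton_eq_map, PySem.List.foldl_append_singleton_eq_map]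
  simp only [List.nil_append]
  apply List.map_congr_left
  intro q _
  exact pvQuery_eq (PySem.List.sorted nums (fun x => x)) q
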